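-- pv_equiv track=rewrite | github.com/DeniseMDB/Practica_python | Biblioteca_stark/funciones_stark_desafio_06.py | buscar_min_max
-- ===== SOURCE A (Python) =====
-- def buscar_min_max(lista: list, key: str, modo: str)-> int:
--     """
--     La función "buscar_min_max" devuelve el índice del valor mínimo o máximo en una lista de diccionarios,
--     basándose en una clave especificada y en el modo de ordenamiento (ascendente o descendente).
--     Recibe como parametros:
--     Una lista de diccionarios, donde cada diccionario representa heroe.
--     El parámetro "key" es una cadena que representa la clave del diccionario
--     en la lista que se utilizará para comparar los valores.
--     El parámetro "modo" es una cadena que especifica el orden de clasificación.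
--     Puede tomar dos valores: 'asc' para orden ascendente y 'desc' para orden descendente.
--     Retorna un entero que representa el índice del elemento mínimo o máximo en la lista,
--     dependiendo del valor del parámetro "modo". Si la lista está vacía, devuelve -1.
--     """
--     retorno = -1
--     if lista:    #es igual que len(lista)>0
--         i_min_max = 0
--         for i in range(len(lista)):
--             if ((modo == 'asc' and lista[i][key] < lista[i_min_max][key]) or
--                 (modo == 'desc' and lista[i][key] > lista[i_min_max][key])):
--                 i_min_max = i
--         retorno = i_min_max
--     return retorno
-- ===== SOURCE B (Python) =====
-- def buscar_min_max(lista: list, key: str, modo: str) -> int: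
--     if not lista:
--         return -1
--     if modo == 'asc':
--         vals = [d[key] for d in lista]
--         return vals.index(min(vals))
--     if modo == 'desc':
--         vals = [d[key] for d in lista]
--         return vals.index(max(vals))
--     return 0
-- ===== Notes on version B (the rewrite author's own statement) =====
-- stated objective: idiomatic
-- what changed: Replaces the manual index-tracking scan over range(len(lista)) with a two-pass decomposition: extract the key values, take min (or max) with the built-in, and return the index of its first occurrence via list.index; first-occurrence ties and the empty-list -1 and invalid-modo 0 results are preserved.
import Mathlib
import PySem

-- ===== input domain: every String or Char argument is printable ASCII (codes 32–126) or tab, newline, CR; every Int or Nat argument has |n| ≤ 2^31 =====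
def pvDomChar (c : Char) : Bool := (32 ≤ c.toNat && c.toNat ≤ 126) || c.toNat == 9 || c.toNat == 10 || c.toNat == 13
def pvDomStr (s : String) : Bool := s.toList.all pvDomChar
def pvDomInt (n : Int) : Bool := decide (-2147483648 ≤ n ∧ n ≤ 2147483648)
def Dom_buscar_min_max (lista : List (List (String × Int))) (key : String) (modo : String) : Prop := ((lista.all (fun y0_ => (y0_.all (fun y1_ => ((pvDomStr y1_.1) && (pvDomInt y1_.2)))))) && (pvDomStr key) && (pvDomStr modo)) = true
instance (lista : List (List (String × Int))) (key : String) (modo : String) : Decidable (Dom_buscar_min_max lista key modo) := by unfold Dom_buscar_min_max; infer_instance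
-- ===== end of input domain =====

-- B replaces A's manual index-tracking scan with the idiomatic two-pass min/max-then-index decomposition; same cost, provably equal result.

-- ===== PORT A =====
-- lista[i][key]: in-range index access (guaranteed under Pre_) ported with pyGetD;
-- the dict lookup d[key], which Python may raise KeyError on, is ported with getD 0 and
-- exactly those inputs are excluded by Pre_.
def buscar_min_max (lista : List (List (String × Int))) (key : String) (modo : String) : Int :=
  if lista ≠ [] then
    (PySem.List.pyRange 0 (lista.length : Int) 1).foldl
      (fun i_min_max i =>
        if ((modo == "asc" && decide ((PySem.Dict.get? (PySem.Dict.mk (PySem.List.pyGetD lista i [])) key).getD 0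
                                      < (PySem.Dict.get? (PySem.Dict.mk (PySem.List.pyGetD lista i_min_max [])) key).getD 0)) ||
            (modo == "desc" && decide ((PySem.Dict.get? (PySem.Dict.mk (PySem.List.pyGetD lista i [])) key).getD 0
                                      > (PySem.Dict.get? (PySem.Dict.mk (PySem.List.pyGetD lista i_min_max [])) key).getD 0)))
        then i else i_min_max) 0
  else -1

-- ===== PORT B =====
def buscar_min_max_alt (lista : List (List (String × Int))) (key : String) (modo : String) : Int :=
  if lista = [] then -1
  else if modo == "asc" then
    let vals := lista.map (fun d => (PySem.Dict.get? (PySem.Dict.mk d) key).getD 0)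
    ((PySem.List.index? vals ((PySem.List.min? vals (fun v => v)).getD 0)).getD 0 : Nat)
  else if modo == "desc" then
    let vals := lista.map (fun d => (PySem.Dict.get? (PySem.Dict.mk d) key).getD 0)
    ((PySem.List.index? vals ((PySem.List.max? vals (fun v => v)).getD 0)).getD 0 : Nat)
  else 0

-- ===== PRECONDITION & SPEC =====
-- Pre_ excludes exactly the inputs on which Python A raises KeyError: modo is 'asc' or 'desc',
-- the list is nonempty, and some dict lacks the key (B raises KeyError there too).
def Pre_buscar_min_max (lista : List (List (String × Int))) (key : String) (modo : String) : Prop :=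
  lista = [] ∨ (modo ≠ "asc" ∧ modo ≠ "desc") ∨
    lista.all (fun d => (PySem.Dict.get? (PySem.Dict.mk d) key).isSome) = true
instance (lista : List (List (String × Int))) (key : String) (modo : String) : Decidable (Pre_buscar_min_max lista key modo) := by unfold Pre_buscar_min_max; infer_instance

def pvWitness_buscar_min_max : (List (List (String × Int))) × String × String :=
  ([[("fuerza", 5)], [("fuerza", 3)], [("fuerza", 3)]], "fuerza", "asc")

def Spec_buscar_min_max (lista : List (List (String × Int))) (key : String) (modo : String) (out : Int) : Prop := out = buscar_min_max_alt lista key modo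
instance (lista : List (List (String × Int))) (key : String) (modo : String) (out : Int) : Decidable (Spec_buscar_min_max lista key modo out) := by unfold Spec_buscar_min_max; infer_instance

-- ===== CLAIM (what is proved, stated in full; the proofs are below) =====
def Claim_equal_buscar_min_max : Prop := ∀ (lista : List (List (String × Int))) (key : String) (modo : String), Dom_buscar_min_max lista key modo → Pre_buscar_min_max lista key modo → Spec_buscar_min_max lista key modo (buscar_min_max lista key modo)

-- ===== LEMMAS AND PROOFS =====

-- A's element access, pushed through the value map used by B.
theorem pv_get_map (lista : List (List (String × Int))) (key : String) (i : Int) :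
    (PySem.Dict.get? (PySem.Dict.mk (PySem.List.pyGetD lista i [])) key).getD 0
      = PySem.List.pyGetD (lista.map (fun d => (PySem.Dict.get? (PySem.Dict.mk d) key).getD 0)) i 0 := by
  have h1 : ∀ (xs : List (List (String × Int))) (j : Int) (d : List (String × Int)),
      PySem.List.pyGetD xs j d = (PySem.List.pyGet? xs j).getD d := by
    intro xs j d; simp [PySem.List.pyGetD, PySem.List.pyGet?]
  have h2 : ∀ (xs : List Int) (j : Int) (d : Int),
      PySem.List.pyGetD xs j d = (PySem.List.pyGet? xs j).getD d := by
    intro xs j d; simp [PySem.List.pyGetD, PySem.List.pyGet?]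
  have hmap : PySem.List.pyGet? (lista.map (fun d => (PySem.Dict.get? (PySem.Dict.mk d) key).getD 0)) i
      = (PySem.List.pyGet? lista i).map (fun d => (PySem.Dict.get? (PySem.Dict.mk d) key).getD 0) := by
    simp [PySem.List.pyGet?]
  rw [h1, h2, hmap]
  cases PySem.List.pyGet? lista i <;> simp [PySem.Dict.get?]

-- best v t ∈ v :: t
theorem pv_best_mem (m2 : Int → Int → Int) (ltb : Int → Int → Bool)
    (hm : ∀ a b, m2 a b = if ltb b a then b else a)
    (v : Int) (t : List Int) : t.foldl m2 v ∈ v :: t := by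
  induction t using List.reverseRecOn with
  | nil => simp
  | append_singleton t' x ih =>
      rw [List.foldl_append]
      simp only [List.foldl_cons, List.foldl_nil, hm]
      by_cases h : ltb x (t'.foldl m2 v) = true
      · simp [h]
      · simp only [Bool.not_eq_true] at h
        simp only [h, Bool.false_eq_true, if_false]
        rcases List.mem_cons.mp ih with h'' | h''
        · rw [h'']; exact List.mem_cons_self
        · exact List.mem_cons_of_mem _ (List.mem_append_left _ h'')

-- no element of v :: t is strictly better than best v t
theorem pv_best_ext (m2 : Int → Int → Int) (ltb : Int → Int → Bool)
    (h1 : ∀ a, ltb a a = false)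
    (h2 : ∀ x m y, ltb x m = true → ltb y m = false → ltb y x = false)
    (hm : ∀ a b, m2 a b = if ltb b a then b else a)
    (v : Int) (t : List Int) : ∀ y ∈ v :: t, ltb y (t.foldl m2 v) = false := by
  induction t using List.reverseRecOn with
  | nil => intro y hy; simp at hy; simp [hy, h1]
  | append_singleton t' x ih =>
      intro y hy
      rw [List.foldl_append]
      simp only [List.foldl_cons, List.foldl_nil, hm]
      by_cases hx : ltb x (t'.foldl m2 v) = true
      · simp only [hx, if_true]
        rcases List.mem_cons.mp hy with rfl | hy'
        · exact h2 x _ y hx (ih y (List.mem_cons_self))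
        · rcases List.mem_append.mp hy' with hy'' | hy''
          · exact h2 x _ y hx (ih y (List.mem_cons_of_mem _ hy''))
          · simp at hy''; subst hy''; exact h1 y
      · simp only [Bool.not_eq_true] at hx
        simp only [hx, Bool.false_eq_true, if_false]
        rcases List.mem_cons.mp hy with rfl | hy'
        · exact ih y List.mem_cons_self
        · rcases List.mem_append.mp hy' with hy'' | hy''
          · exact ih y (List.mem_cons_of_mem _ hy'')
          · simp at hy''; subst hy''; exact hx

-- the scan state stays in range, and appending an element does not change the scan over old indices
theorem pv_scan_congr (ltb : Int → Int → Bool) (P : List Int) (x : Int) :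
    ∀ (is : List Int) (j : Int), (∀ i ∈ is, 0 ≤ i ∧ i < (P.length : Int)) →
      0 ≤ j → j < (P.length : Int) →
      is.foldl (fun j i => if ltb (PySem.List.pyGetD (P ++ [x]) i 0) (PySem.List.pyGetD (P ++ [x]) j 0) then i else j) j
        = is.foldl (fun j i => if ltb (PySem.List.pyGetD P i 0) (PySem.List.pyGetD P j 0) then i else j) j
      ∧ 0 ≤ is.foldl (fun j i => if ltb (PySem.List.pyGetD P i 0) (PySem.List.pyGetD P j 0) then i else j) j
      ∧ is.foldl (fun j i => if ltb (PySem.List.pyGetD P i 0) (PySem.List.pyGetD P j 0) then i else j) j < (P.length : Int) := by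
  intro is
  induction is with
  | nil => intro j _ hj0 hj1; exact ⟨rfl, hj0, hj1⟩
  | cons i is ih =>
      intro j hmem hj0 hj1
      have hi := hmem i (List.mem_cons_self)
      have hgi : PySem.List.pyGetD (P ++ [x]) i 0 = PySem.List.pyGetD P i 0 := by
        rw [PySem.List.pyGetD_eq_getElem _ _ hi.1 (by simp; omega),
            PySem.List.pyGetD_eq_getElem _ _ hi.1 (by omega)]
        exact List.getElem_append_left (by omega)
      have hgj : PySem.List.pyGetD (P ++ [x]) j 0 = PySem.List.pyGetD P j 0 := by
        rw [PySem.List.pyGetD_eq_getElem _ _ hj0 (by simp; omega),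
            PySem.List.pyGetD_eq_getElem _ _ hj0 (by omega)]
        exact List.getElem_append_left (by omega)
      simp only [List.foldl_cons, hgi, hgj]
      by_cases h : ltb (PySem.List.pyGetD P i 0) (PySem.List.pyGetD P j 0) = true
      · simp only [h, if_true]
        exact ih i (fun k hk => hmem k (List.mem_cons_of_mem _ hk)) hi.1 hi.2
      · simp only [Bool.not_eq_true] at h
        simp only [h, Bool.false_eq_true, if_false]
        exact ih j (fun k hk => hmem k (List.mem_cons_of_mem _ hk)) hj0 hj1

-- core: the first-occurrence index-tracking scan computes the index of the first extremal value
theorem pv_scan_core (ltb : Int → Int → Bool) (m2 : Int → Int → Int)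
    (h1 : ∀ a, ltb a a = false)
    (h2 : ∀ x m y, ltb x m = true → ltb y m = false → ltb y x = false)
    (hm : ∀ a b, m2 a b = if ltb b a then b else a)
    (v : Int) (t : List Int) :
    (PySem.List.pyRange 0 (((v :: t).length : Int)) 1).foldl
        (fun j i => if ltb (PySem.List.pyGetD (v :: t) i 0) (PySem.List.pyGetD (v :: t) j 0) then i else j) 0
      = (((PySem.List.index? (v :: t) (t.foldl m2 v)).getD 0 : Nat) : Int) := by
  induction t using List.reverseRecOn with
  | nil => simp [PySem.List.pyRange, h1, PySem.List.index?, PySem.List.pyGetD]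
  | append_singleton t' x ih =>
      have hPl : (v :: (t' ++ [x])) = (v :: t') ++ [x] := by simp
      have hmm : t'.foldl m2 v ∈ v :: t' := pv_best_mem m2 ltb hm v t'
      obtain ⟨k0, hk0⟩ := Option.isSome_iff_exists.mp ((PySem.List.index?_isSome_iff _ _).mpr hmm)
      obtain ⟨hk0lt, hk0val, -⟩ := PySem.List.getElem_of_index?_eq_some hk0
      have hlen : ((((v :: t') ++ [x]).length : Nat) : Int) = (((v :: t').length : Nat) : Int) + 1 := by
        simp
      rw [hPl, hlen, PySem.List.pyRange_one_succ_right (by positivity), List.foldl_append]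
      obtain ⟨hc, h0, hltP⟩ := pv_scan_congr ltb (v :: t') x
          (PySem.List.pyRange 0 (((v :: t').length : Nat) : Int) 1) 0
          (fun i hi => by
            have := PySem.List.mem_pyRange_one.mp hi
            exact ⟨this.1, this.2⟩)
          (le_refl 0) (by exact_mod_cast Nat.succ_pos t'.length)
      simp only [List.foldl_cons, List.foldl_nil]
      rw [hc, ih, hk0]
      simp only [Option.getD_some]
      have hgx : PySem.List.pyGetD ((v :: t') ++ [x]) (((v :: t').length : Nat) : Int) 0 = x := by
        rw [PySem.List.pyGetD_natCast]
        simp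
      have hgk : PySem.List.pyGetD ((v :: t') ++ [x]) ((k0 : Nat) : Int) 0 = t'.foldl m2 v := by
        have hlt2 : ((k0 : Nat) : Int) < ((((v :: t') ++ [x]).length : Nat) : Int) := by
          simp only [List.length_append, List.length_cons]
          simp only [List.length_cons] at hk0lt
          exact_mod_cast Nat.lt_succ_of_lt hk0lt
        rw [PySem.List.pyGetD_eq_getElem _ 0 (Int.natCast_nonneg k0) hlt2]
        simp only [Int.toNat_natCast]
        rw [List.getElem_append_left hk0lt]
        exact hk0val
      have hbest : (t' ++ [x]).foldl m2 v = if ltb x (t'.foldl m2 v) then x else t'.foldl m2 v := by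
        rw [List.foldl_append]
        simp [hm]
      rw [hgx, hgk, hbest]
      by_cases hx : ltb x (t'.foldl m2 v) = true
      · have hnot : x ∉ v :: t' := fun hxP => by
          have hfalse := pv_best_ext m2 ltb h1 h2 hm v t' x hxP
          rw [hx] at hfalse
          cases hfalse
        rw [if_pos hx, if_pos hx, PySem.List.index?_append_singleton_self _ x hnot]
        simp
      · simp only [Bool.not_eq_true] at hx
        rw [hx]
        simp only [Bool.false_eq_true, if_false]
        rw [PySem.List.index?_append_of_mem [x] hmm, hk0]
        simp

-- total equality of the two ports (the claim's Pre_ hypothesis is not needed: both ports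
-- read missing keys / out-of-range accesses through the same defaults)
theorem pv_total (lista : List (List (String × Int))) (key : String) (modo : String) :
    buscar_min_max lista key modo = buscar_min_max_alt lista key modo := by
  unfold buscar_min_max buscar_min_max_alt
  cases lista with
  | nil => simp
  | cons d rest =>
      have hget : ∀ i : Int, ((PySem.Dict.mk (PySem.List.pyGetD (d :: rest) i [])).get? key).getD 0
          = PySem.List.pyGetD ((d :: rest).map (fun d => (PySem.Dict.get? (PySem.Dict.mk d) key).getD 0)) i 0 :=
        fun i => pv_get_map (d :: rest) key i
      by_cases hasc : modo = "asc"
      · subst hasc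
        simp only [ne_eq, reduceCtorEq, not_false_eq_true, if_true]
        simp only [show ("asc" == "asc") = true from rfl, show ("asc" == "desc") = false from rfl,
          Bool.true_and, Bool.false_and, Bool.or_false]
        simp only [hget]
        rw [show (d :: rest).map (fun d => (PySem.Dict.get? (PySem.Dict.mk d) key).getD 0)
              = ((PySem.Dict.get? (PySem.Dict.mk d) key).getD 0)
                :: rest.map (fun d => (PySem.Dict.get? (PySem.Dict.mk d) key).getD 0) from rfl]
        rw [show (((d :: rest).length : Nat) : Int)
              = (((((PySem.Dict.get? (PySem.Dict.mk d) key).getD 0)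
                :: rest.map (fun d => (PySem.Dict.get? (PySem.Dict.mk d) key).getD 0)).length : Nat) : Int) by simp]
        rw [pv_scan_core (fun a b => decide (a < b)) min
              (by intro a; simp)
              (by intro x m y hxm hym; simp only [decide_eq_true_eq, decide_eq_false_iff_not] at hxm hym ⊢; omega)
              (by intro a b; simp only [min_def, decide_eq_true_eq]; split <;> split <;> omega)]
        rw [PySem.List.min?_id_cons]
        simp
      · by_cases hdesc : modo = "desc"
        · subst hdesc
          simp only [ne_eq, reduceCtorEq, not_false_eq_true, if_true]
          simp only [show ("desc" == "asc") = false from rfl, show ("desc" == "desc") = true from rfl,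
            Bool.true_and, Bool.false_and, Bool.false_or]
          simp only [hget]
          rw [show (d :: rest).map (fun d => (PySem.Dict.get? (PySem.Dict.mk d) key).getD 0)
                = ((PySem.Dict.get? (PySem.Dict.mk d) key).getD 0)
                  :: rest.map (fun d => (PySem.Dict.get? (PySem.Dict.mk d) key).getD 0) from rfl]
          rw [show (((d :: rest).length : Nat) : Int)
                = (((((PySem.Dict.get? (PySem.Dict.mk d) key).getD 0)
                  :: rest.map (fun d => (PySem.Dict.get? (PySem.Dict.mk d) key).getD 0)).length : Nat) : Int) by simp]
          rw [pv_scan_core (fun a b => decide (b < a)) max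
                (by intro a; simp)
                (by intro x m y hxm hym; simp only [decide_eq_true_eq, decide_eq_false_iff_not] at hxm hym ⊢; omega)
                (by intro a b; simp only [max_def, decide_eq_true_eq]; split <;> split <;> omega)]
          rw [PySem.List.max?_id_cons]
          simp
        · have h1 : (modo == "asc") = false := by simp [hasc]
          have h2 : (modo == "desc") = false := by simp [hdesc]
          simp only [ne_eq, reduceCtorEq, not_false_eq_true, if_true, h1, h2, Bool.false_and, Bool.or_self, Bool.false_eq_true, if_false]
          exact List.foldl_fixed _

-- ===== VERDICT (by name: the statement is the Claim_ definition above) =====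
theorem buscar_min_max_spec : Claim_equal_buscar_min_max := by
  intro lista key modo _ _
  exact pv_total lista key modo
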